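-- pv_equiv track=rewrite | github.com/ishayyemini/CS1001 | ex3/hw3_322868852.py | find
-- ===== SOURCE A (Python) =====
-- def find(lst, s):
--     left = 0
--     right = len(lst) - 1
--
--     while left <= right:
--         mid = (left + right) // 2
--         if s == lst[mid]:
--             return mid
--         elif s < lst[mid]:  # Item cannot be above mid+1 as the list is almost sorted
--             if mid < right and s == lst[mid + 1]:
--                 return mid + 1
--             right = mid - 1
--         else:
--             if mid > left and s == lst[mid - 1]:
--                 return mid - 1
--             left = mid + 1
--
--     return None
-- ===== SOURCE B (Python) =====
-- def find(lst, s):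
--     return find_rec(lst, s, 0, len(lst) - 1)
--
--
-- def find_rec(lst, s, left, right):
--     if left > right:
--         return None
--     mid = (left + right) // 2
--     if s == lst[mid]:
--         return mid
--     if s < lst[mid]:  # item cannot be above mid+1 in an almost-sorted list
--         if mid < right and s == lst[mid + 1]:
--             return mid + 1
--         return find_rec(lst, s, left, mid - 1)
--     if mid > left and s == lst[mid - 1]:
--         return mid - 1
--     return find_rec(lst, s, mid + 1, right)
-- ===== Notes on version B (the rewrite author's own statement) =====
-- stated objective: alternative
-- what changed: The iterative while-loop binary search (with neighbor probes) is re-decomposed as a thin wrapper over a bounds-passing recursive helper find_rec(lst, s, left, right), keeping the exact probe sequence.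
import Mathlib
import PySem

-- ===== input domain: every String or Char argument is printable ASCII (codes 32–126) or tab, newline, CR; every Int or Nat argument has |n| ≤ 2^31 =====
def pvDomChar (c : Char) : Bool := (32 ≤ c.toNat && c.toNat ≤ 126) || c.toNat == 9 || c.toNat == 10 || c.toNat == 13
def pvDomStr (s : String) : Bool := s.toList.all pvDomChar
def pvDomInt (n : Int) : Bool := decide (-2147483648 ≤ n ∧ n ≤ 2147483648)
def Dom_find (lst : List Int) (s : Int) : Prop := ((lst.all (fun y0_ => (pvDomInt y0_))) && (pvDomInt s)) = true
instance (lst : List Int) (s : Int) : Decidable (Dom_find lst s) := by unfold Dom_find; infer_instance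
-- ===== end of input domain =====

-- B re-decomposes A's iterative almost-sorted binary search as a bounds-passing recursive helper
-- with the identical probe sequence (same cost; objective: alternative decomposition).


-- ===== PORT A =====
-- A's while-loop, as fuel recursion over the mutable state (left, right); the fuel
-- (lst.length + 1) strictly exceeds the number of iterations, since right - left shrinks each turn.
def findLoop (lst : List Int) (s : Int) (fuel : Nat) (left right : Int) : Option Int :=
  match fuel with
  | 0 => none
  | fuel + 1 =>
    if left ≤ right then
      let mid := PySem.Int.floordiv (left + right) 2
      match PySem.List.pyGet? lst mid with
      | none => none   -- IndexError (unreachable: left ≤ mid ≤ right within bounds)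
      | some v =>
        if s = v then some mid
        else if s < v then
          if mid < right then
            match PySem.List.pyGet? lst (mid + 1) with
            | none => none
            | some w => if s = w then some (mid + 1) else findLoop lst s fuel left (mid - 1)
          else findLoop lst s fuel left (mid - 1)
        else
          if left < mid then
            match PySem.List.pyGet? lst (mid - 1) with
            | none => none
            | some w => if s = w then some (mid - 1) else findLoop lst s fuel (mid + 1) right
          else findLoop lst s fuel (mid + 1) right
    else none

def find (lst : List Int) (s : Int) : Option Int :=
  findLoop lst s (lst.length + 1) 0 (PySem.List.len lst - 1)

-- ===== PORT B =====
-- Termination facts for find_rec's recursion, cited by name in its decreasing_by.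
theorem pv_dec_left (left right : Int) (h : ¬ left > right) :
    (PySem.Int.floordiv (left + right) 2 - 1 + 1 - left).toNat < (right + 1 - left).toNat := by
  have hb := PySem.Int.floordiv_two_mid_bounds (lo := left) (hi := right) (by omega)
  omega

theorem pv_dec_right (left right : Int) (h : ¬ left > right) :
    (right + 1 - (PySem.Int.floordiv (left + right) 2 + 1)).toNat < (right + 1 - left).toNat := by
  have hb := PySem.Int.floordiv_two_mid_bounds (lo := left) (hi := right) (by omega)
  omega

-- Source B's find_rec: structural recursion on the shrinking interval [left, right].
def findRec (lst : List Int) (s : Int) (left right : Int) : Option Int :=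
  if _hlr : left > right then none
  else
    let mid := PySem.Int.floordiv (left + right) 2
    match PySem.List.pyGet? lst mid with
    | none => none   -- IndexError (unreachable)
    | some v =>
      if s = v then some mid
      else if s < v then
        if mid < right then
          match PySem.List.pyGet? lst (mid + 1) with
          | none => none
          | some w => if s = w then some (mid + 1) else findRec lst s left (mid - 1)
        else findRec lst s left (mid - 1)
      else
        if left < mid then
          match PySem.List.pyGet? lst (mid - 1) with
          | none => none
          | some w => if s = w then some (mid - 1) else findRec lst s (mid + 1) right
        else findRec lst s (mid + 1) right
termination_by (right + 1 - left).toNat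
decreasing_by
  all_goals first
    | exact pv_dec_left left right _hlr
    | exact pv_dec_right left right _hlr

def find_alt (lst : List Int) (s : Int) : Option Int :=
  findRec lst s 0 (PySem.List.len lst - 1)

-- ===== PRECONDITION & SPEC =====
def Spec_find (lst : List Int) (s : Int) (out : Option Int) : Prop := out = find_alt lst s
instance (lst : List Int) (s : Int) (out : Option Int) : Decidable (Spec_find lst s out) := by unfold Spec_find; infer_instance

-- ===== CLAIM (what is proved, stated in full; the proofs are below) =====
def Claim_equal_find : Prop := ∀ (lst : List Int) (s : Int), Dom_find lst s → Spec_find lst s (find lst s)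

-- ===== LEMMAS AND PROOFS =====
-- With enough fuel, A's loop computes exactly B's recursion on the same interval.
theorem findLoop_eq_findRec (lst : List Int) (s : Int) :
    ∀ (fuel : Nat) (left right : Int), (right + 1 - left).toNat < fuel →
      findLoop lst s fuel left right = findRec lst s left right := by
  intro fuel
  induction fuel with
  | zero => intro left right h; omega
  | succ fuel ih =>
    intro left right h
    rw [findRec]
    simp only [findLoop]
    by_cases hlr : left ≤ right
    · have hb := PySem.Int.floordiv_two_mid_bounds (lo := left) (hi := right) hlr
      simp only [hlr, if_true, show ¬ left > right by omega, dif_neg, not_false_iff]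
      cases PySem.List.pyGet? lst (PySem.Int.floordiv (left + right) 2) with
      | none => rfl
      | some v =>
        by_cases hsv : s = v
        · simp [hsv]
        · simp only [hsv, if_false]
          by_cases hlt : s < v
          · simp only [hlt, if_true]
            by_cases hmr : PySem.Int.floordiv (left + right) 2 < right
            · simp only [hmr, if_true]
              cases PySem.List.pyGet? lst (PySem.Int.floordiv (left + right) 2 + 1) with
              | none => rfl
              | some w =>
                by_cases hsw : s = w
                · simp [hsw]
                · simp only [hsw, if_false]
                  exact ih left (PySem.Int.floordiv (left + right) 2 - 1) (by omega)
            · simp only [hmr, if_false]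
              exact ih left (PySem.Int.floordiv (left + right) 2 - 1) (by omega)
          · simp only [hlt, if_false]
            by_cases hlm : left < PySem.Int.floordiv (left + right) 2
            · simp only [hlm, if_true]
              cases PySem.List.pyGet? lst (PySem.Int.floordiv (left + right) 2 - 1) with
              | none => rfl
              | some w =>
                by_cases hsw : s = w
                · simp [hsw]
                · simp only [hsw, if_false]
                  exact ih (PySem.Int.floordiv (left + right) 2 + 1) right (by omega)
            · simp only [hlm, if_false]
              exact ih (PySem.Int.floordiv (left + right) 2 + 1) right (by omega)
    · simp only [hlr, if_false]
      rw [dif_pos (by omega)]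

-- ===== VERDICT (by name: the statement is the Claim_ definition above) =====
theorem find_spec : Claim_equal_find := by
  intro lst s _
  unfold Spec_find find find_alt
  apply findLoop_eq_findRec
  simp [PySem.List.len_eq]
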